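-- pv_equiv track=rewrite | github.com/kfmurphy/common_crawl_with_scrapy | ccFetch/ccFetch/spiders/MCE_Controller.py | allocate_job
-- ===== SOURCE A (Python) =====
-- def allocate_job(size, num_nodes):
--     """ Divide the clusters to be processed among the nodes
--     """
--     num_keys_per_node = size // num_nodes
--     remainder = size % num_nodes
--     start = 0
--     end = num_keys_per_node
--     node_params = []
--     for i in range(num_nodes):
--         if i < remainder:
--             end += 1
--         node_params.append({'start': start, 'end': end})
--         start = end
--         end += num_keys_per_node
--     return node_params
-- ===== SOURCE B (Python) =====
-- def allocate_job(size, num_nodes):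
--     """ Divide the clusters to be processed among the nodes """
--     q, r = divmod(size, num_nodes)
--     return [{'start': i * q + min(i, r), 'end': (i + 1) * q + min(i + 1, r)}
--             for i in range(num_nodes)]
-- ===== Notes on version B (the rewrite author's own statement) =====
-- stated objective: simpler
-- what changed: Replaces the threaded start/end accumulator and the i<remainder increment branch with a direct per-index closed form: node i's range is [i*q+min(i,r), (i+1)*q+min(i+1,r)) with q,r = divmod(size,num_nodes), built in one comprehension.
import Mathlib
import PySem

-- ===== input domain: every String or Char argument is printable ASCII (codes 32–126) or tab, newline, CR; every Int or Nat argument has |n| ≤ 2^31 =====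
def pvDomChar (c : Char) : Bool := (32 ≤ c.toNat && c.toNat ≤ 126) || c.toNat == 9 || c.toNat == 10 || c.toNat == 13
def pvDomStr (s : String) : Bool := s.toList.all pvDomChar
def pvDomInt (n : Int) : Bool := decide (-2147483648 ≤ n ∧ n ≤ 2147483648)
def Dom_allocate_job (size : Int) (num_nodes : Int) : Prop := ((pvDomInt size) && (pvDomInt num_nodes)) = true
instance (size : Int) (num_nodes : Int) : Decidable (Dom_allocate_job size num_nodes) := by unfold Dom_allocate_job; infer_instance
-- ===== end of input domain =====

-- B replaces A's carried start/end accumulator by a per-index closed form i*q + min(i,r); objective: simpler.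

-- ===== PORT A =====
def allocate_job (size : Int) (num_nodes : Int) : List (List (String × Int)) :=
  let num_keys_per_node := PySem.Int.floordiv size num_nodes
  let remainder := PySem.Int.mod size num_nodes
  let st := (PySem.List.pyRange 0 num_nodes 1).foldl
    (fun (s : Int × Int × List (List (String × Int))) i =>
      let start := s.1
      let e := if i < remainder then s.2.1 + 1 else s.2.1
      (e, e + num_keys_per_node, s.2.2 ++ [[("start", start), ("end", e)]]))
    (0, num_keys_per_node, [])
  st.2.2

-- ===== PORT B =====
def allocate_job_alt (size : Int) (num_nodes : Int) : List (List (String × Int)) :=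
  let q := PySem.Int.floordiv size num_nodes
  let r := PySem.Int.mod size num_nodes
  (PySem.List.pyRange 0 num_nodes 1).map
    (fun i => [("start", i * q + min i r), ("end", (i + 1) * q + min (i + 1) r)])

-- ===== PRECONDITION & SPEC =====
-- A (and B) raise ZeroDivisionError when num_nodes = 0; excluded.
def Pre_allocate_job (size : Int) (num_nodes : Int) : Prop := num_nodes ≠ 0
instance (size : Int) (num_nodes : Int) : Decidable (Pre_allocate_job size num_nodes) := by unfold Pre_allocate_job; infer_instance
def pvWitness_allocate_job : Int × Int := (10, 3)

def Spec_allocate_job (size : Int) (num_nodes : Int) (out : List (List (String × Int))) : Prop := out = allocate_job_alt size num_nodes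
instance (size : Int) (num_nodes : Int) (out : List (List (String × Int))) : Decidable (Spec_allocate_job size num_nodes out) := by unfold Spec_allocate_job; infer_instance

-- ===== CLAIM (what is proved, stated in full; the proofs are below) =====
def Claim_equal_allocate_job : Prop := ∀ (size : Int) (num_nodes : Int), Dom_allocate_job size num_nodes → Pre_allocate_job size num_nodes → Spec_allocate_job size num_nodes (allocate_job size num_nodes)

-- ===== LEMMAS AND PROOFS =====

-- Invariant of A's loop over range(0, m): after m steps the carried
-- (start, end, acc) state equals its closed form.
theorem allocate_loop_inv (q r : Int) (hr : 0 ≤ r) (m : Nat) :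
    (PySem.List.pyRange 0 m 1).foldl
      (fun (s : Int × Int × List (List (String × Int))) i =>
        let start := s.1
        let e := if i < r then s.2.1 + 1 else s.2.1
        (e, e + q, s.2.2 ++ [[("start", start), ("end", e)]]))
      (0, q, [])
    = ((m : Int) * q + min (m : Int) r, ((m : Int) + 1) * q + min (m : Int) r,
       (PySem.List.pyRange 0 m 1).map
         (fun i => [("start", i * q + min i r), ("end", (i + 1) * q + min (i + 1) r)])) := by
  induction m with
  | zero => simp [PySem.List.pyRange_one_eq_nil (by omega : (0:Int) ≤ 0)]; omega
  | succ n ih =>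
    have h : ((n + 1 : Nat) : Int) = (n : Int) + 1 := by push_cast; ring
    rw [h, PySem.List.pyRange_one_succ_right (by positivity), List.foldl_append, List.map_append, ih]
    simp only [List.foldl_cons, List.foldl_nil, List.map_cons, List.map_nil]
    by_cases hc : (n : Int) < r
    · have h1 : min ((n : Int)) r = (n : Int) := by omega
      have h2 : min ((n : Int) + 1) r = (n : Int) + 1 := by omega
      simp only [hc, if_pos, h1, h2]
      refine Prod.ext ?_ (Prod.ext ?_ ?_) <;> simp <;> ring
    · have h1 : min ((n : Int)) r = r := by omega
      have h2 : min ((n : Int) + 1) r = r := by omega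
      simp only [hc, if_false, h1, h2]
      refine Prod.ext ?_ (Prod.ext ?_ ?_) <;> simp <;> ring

-- ===== VERDICT (by name: the statement is the Claim_ definition above) =====
theorem allocate_job_spec : Claim_equal_allocate_job := by
  intro size n _ hn
  unfold Spec_allocate_job allocate_job allocate_job_alt
  dsimp only
  by_cases hpos : 0 < n
  · have hr0 : 0 ≤ PySem.Int.mod size n := by
      rw [PySem.Int.mod_eq_emod_of_pos hpos]
      exact Int.emod_nonneg size (by omega)
    have hcast : n = ((n.toNat : Nat) : Int) := by omega
    rw [hcast]
    rw [allocate_loop_inv (PySem.Int.floordiv size ((n.toNat : Nat) : Int))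
        (PySem.Int.mod size ((n.toNat : Nat) : Int)) (by rw [← hcast]; exact hr0) n.toNat]
  · have hle : n ≤ 0 := by omega
    rw [PySem.List.pyRange_one_eq_nil hle]
    rfl
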